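-- pv_equiv track=rewrite | github.com/salesforce/causalai | causalai/models/tabular/causal_inference.py | get_adjacency_graph
-- ===== SOURCE A (Python) =====
-- def get_adjacency_graph(graph):
--     '''
--     Given graph where keys are children and values are parents, convert to adjacency graph where
--     keys are parents and values are children.
--     '''
--     ad_graph = dict()
--     all_nodes = []
--     for child, parents in graph.items():
--         if child not in all_nodes:
--             all_nodes.append(child)
--
--         for parent in parents:
--             if parent not in all_nodes:
--                 all_nodes.append(parent)
--
--             if parent in ad_graph:
--                 ad_graph[parent].append(child)
--             else:
--                 ad_graph[parent] = [child]
--     for node in all_nodes: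
--         if node not in ad_graph.keys():
--             ad_graph[node] = []
--     return ad_graph, all_nodes
-- ===== SOURCE B (Python) =====
-- def get_adjacency_graph(graph):
--     '''
--     Given graph where keys are children and values are parents, convert to adjacency graph where
--     keys are parents and values are children.
--     '''
--     all_nodes = list(dict.fromkeys(n for child, parents in graph.items() for n in (child, *parents)))
--     parent_order = list(dict.fromkeys(p for parents in graph.values() for p in parents))
--     ad_graph = {p: [c for c, ps in graph.items() for q in ps if q == p] for p in parent_order}
--     for n in all_nodes:
--         ad_graph.setdefault(n, [])
--     return ad_graph, all_nodes
-- ===== Notes on version B (the rewrite author's own statement) =====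
-- stated objective: alternative
-- what changed: A builds the adjacency dict incrementally inside the node-collection loop (membership branch per parent, plus a trailing fill-missing loop); B derives all_nodes and the parent order as ordered dedups of flattened sequences and builds the whole dict in one comprehension that gathers each parent's children directly, with setdefault for parentless nodes.
import Mathlib
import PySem

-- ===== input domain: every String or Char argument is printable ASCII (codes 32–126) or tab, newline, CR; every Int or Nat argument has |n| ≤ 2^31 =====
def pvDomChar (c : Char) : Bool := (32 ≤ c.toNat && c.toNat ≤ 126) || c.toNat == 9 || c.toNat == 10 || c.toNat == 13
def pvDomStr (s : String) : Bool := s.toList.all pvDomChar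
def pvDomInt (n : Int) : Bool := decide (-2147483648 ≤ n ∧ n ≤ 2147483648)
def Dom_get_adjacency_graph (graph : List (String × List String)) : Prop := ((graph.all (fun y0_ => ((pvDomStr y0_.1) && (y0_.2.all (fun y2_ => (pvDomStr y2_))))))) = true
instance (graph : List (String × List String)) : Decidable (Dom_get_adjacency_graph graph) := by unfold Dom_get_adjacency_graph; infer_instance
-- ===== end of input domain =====

-- B replaces A's incremental dict building (per-parent membership branch + trailing fill loop)
-- by ordered dedups of flattened sequences and a single per-parent gathering comprehension; same cost (alternative).

-- ===== PORT A =====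
-- single loop over graph.items() carrying (ad_graph, all_nodes); then the fill-missing loop
def get_adjacency_graph (graph : List (String × List String)) : (List (String × List String)) × List String :=
  let st := graph.foldl
    (fun (st : PySem.Dict String (List String) × List String) cp =>
      cp.2.foldl
        (fun st p =>
          (if st.1.contains p then st.1.modify p [] (fun l => l ++ [cp.1]) else st.1.insert p [cp.1],
           if p ∈ st.2 then st.2 else st.2 ++ [p]))
        (st.1, if cp.1 ∈ st.2 then st.2 else st.2 ++ [cp.1]))
    (PySem.Dict.empty, [])
  let ad := st.2.foldl
    (fun (d : PySem.Dict String (List String)) n => if d.contains n then d else d.insert n []) st.1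
  (ad.items, st.2)

-- ===== PORT B =====
-- dict.fromkeys dedups; dict comprehension gathering each parent's children; setdefault fill
def get_adjacency_graph_alt (graph : List (String × List String)) : (List (String × List String)) × List String :=
  let all_nodes := PySem.List.dedup (graph.flatMap (fun cp => cp.1 :: cp.2))
  let parent_order := PySem.List.dedup (graph.flatMap (fun cp => cp.2))
  let ad := PySem.Dict.ofList
    (parent_order.map (fun p => (p, graph.flatMap (fun cp => (cp.2.filter (fun q => q == p)).map (fun _ => cp.1)))))
  let ad2 := all_nodes.foldl (fun d n => PySem.Dict.setdefault d n []) ad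
  (ad2.items, all_nodes)

-- ===== PRECONDITION & SPEC =====
def Spec_get_adjacency_graph (graph : List (String × List String)) (out : (List (String × List String)) × List String) : Prop := out = get_adjacency_graph_alt graph
instance (graph : List (String × List String)) (out : (List (String × List String)) × List String) : Decidable (Spec_get_adjacency_graph graph out) := by unfold Spec_get_adjacency_graph; infer_instance

-- ===== CLAIM (what is proved, stated in full; the proofs are below) =====
def Claim_equal_get_adjacency_graph : Prop := ∀ (graph : List (String × List String)), Dom_get_adjacency_graph graph → Spec_get_adjacency_graph graph (get_adjacency_graph graph)

-- ===== LEMMAS AND PROOFS =====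

-- the (parent, child) pairs of the inverted graph, in A's processing order
def pvPairs (graph : List (String × List String)) : List (String × String) :=
  graph.flatMap (fun cp => cp.2.map (fun p => (p, cp.1)))

-- A's if-contains branch is exactly a modify with default []
lemma pv_if_modify (d : PySem.Dict String (List String)) (p c : String) :
    (if d.contains p then d.modify p [] (fun l => l ++ [c]) else d.insert p [c])
      = d.modify p [] (fun l => l ++ [c]) := by
  by_cases h : d.contains p = true
  · simp [h]
  · simp only [Bool.not_eq_true] at h
    simp [h, PySem.Dict.modify, PySem.Dict.getD_of_not_contains d [] h]

-- A's interleaved loop splits into an independent dict fold and an independent node fold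
lemma pv_state_split (graph : List (String × List String))
    (d : PySem.Dict String (List String)) (ns : List String) :
    graph.foldl
      (fun (st : PySem.Dict String (List String) × List String) cp =>
        cp.2.foldl
          (fun st p =>
            (if st.1.contains p then st.1.modify p [] (fun l => l ++ [cp.1]) else st.1.insert p [cp.1],
             if p ∈ st.2 then st.2 else st.2 ++ [p]))
          (st.1, if cp.1 ∈ st.2 then st.2 else st.2 ++ [cp.1]))
      (d, ns)
    = (graph.foldl (fun d cp => cp.2.foldl (fun d p => d.modify p [] (fun l => l ++ [cp.1])) d) d,
       graph.foldl (fun ns cp => cp.2.foldl PySem.Set.add (PySem.Set.add ns cp.1)) ns) := by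
  induction graph generalizing d ns with
  | nil => rfl
  | cons cp t ih =>
      simp only [List.foldl_cons]
      rw [PySem.List.foldl_prod_mk
            (f := fun d p => if PySem.Dict.contains d p then d.modify p [] (fun l => l ++ [cp.1]) else d.insert p [cp.1])
            (g := fun ns p => if p ∈ ns then ns else ns ++ [p])]
      rw [ih]
      have h1 : (fun (d : PySem.Dict String (List String)) p =>
          if d.contains p then d.modify p [] (fun l => l ++ [cp.1]) else d.insert p [cp.1])
          = fun d p => d.modify p [] (fun l => l ++ [cp.1]) := by
        funext d p; exact pv_if_modify d p cp.1
      have h2 : (fun (ns : List String) p => if p ∈ ns then ns else ns ++ [p])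
          = PySem.Set.add := by
        funext ns p; exact (PySem.Set.add_eq_ite ns p).symm
      rw [h1, h2, ← PySem.Set.add_eq_ite]

-- A's node list is the ordered dedup of the flattened child-then-parents sequence
lemma pv_nodes_eq (graph : List (String × List String)) :
    graph.foldl (fun ns cp => cp.2.foldl PySem.Set.add (PySem.Set.add ns cp.1)) []
      = PySem.List.dedup (graph.flatMap (fun cp => cp.1 :: cp.2)) := by
  simp only [PySem.List.dedup_eq_ofList, PySem.Set.ofList_eq_foldl, List.foldl_flatMap,
    List.foldl_cons]

-- A's dict loop is the single fold of modify over the flattened (parent, child) pairs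
lemma pv_dict_flatten (graph : List (String × List String)) :
    graph.foldl (fun d cp => cp.2.foldl (fun d p => d.modify p [] (fun l => l ++ [cp.1])) d)
      PySem.Dict.empty
    = (pvPairs graph).foldl (fun d pr => d.modify pr.1 [] (fun l => l ++ [pr.2])) PySem.Dict.empty := by
  simp only [pvPairs, List.foldl_flatMap, List.foldl_map]

-- its keys are the parents in first-appearance order
lemma pv_dict_keys (graph : List (String × List String)) :
    ((pvPairs graph).foldl (fun d pr => d.modify pr.1 [] (fun l => l ++ [pr.2]))
        PySem.Dict.empty).keys
      = PySem.List.dedup (graph.flatMap (fun cp => cp.2)) := by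
  rw [PySem.Dict.keys_foldl_modify_key (pvPairs graph) Prod.fst [] (fun _ pr l => l ++ [pr.2])]
  simp [pvPairs, PySem.Set.update_nil_left, List.map_flatMap, Function.comp_def]

-- its value at any key is B's gathered children list
lemma pv_dict_getD (graph : List (String × List String)) (k : String) :
    ((pvPairs graph).foldl (fun d pr => d.modify pr.1 [] (fun l => l ++ [pr.2]))
        PySem.Dict.empty).getD k []
      = graph.flatMap (fun cp => (cp.2.filter (fun q => q == k)).map (fun _ => cp.1)) := by
  rw [PySem.Dict.getD_foldl_modify_append]
  simp [pvPairs, List.filter_flatMap, List.map_flatMap, List.filter_map, Function.comp_def]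

-- B's dict-comprehension port has exactly its listed items
lemma pv_ofList_items (graph : List (String × List String)) :
    (PySem.Dict.ofList
        ((PySem.List.dedup (graph.flatMap (fun cp => cp.2))).map
          (fun p => (p, graph.flatMap (fun cp => (cp.2.filter (fun q => q == p)).map (fun _ => cp.1)))))).items
      = (PySem.List.dedup (graph.flatMap (fun cp => cp.2))).map
          (fun p => (p, graph.flatMap (fun cp => (cp.2.filter (fun q => q == p)).map (fun _ => cp.1)))) := by
  simp only [PySem.Dict.ofList, PySem.Dict.update]
  rw [PySem.Dict.items_foldl_insert_fresh _ Prod.fst Prod.snd PySem.Dict.empty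
        (by intro a _; simp)
        (by simp [List.map_map, Function.comp_def, PySem.List.dedup_eq_ofList, PySem.Set.nodup_ofList])]
  simp [PySem.Dict.empty]

-- A's dict equals B's dict
lemma pv_dict_eq (graph : List (String × List String)) :
    (pvPairs graph).foldl (fun d pr => d.modify pr.1 [] (fun l => l ++ [pr.2])) PySem.Dict.empty
      = PySem.Dict.ofList
          ((PySem.List.dedup (graph.flatMap (fun cp => cp.2))).map
            (fun p => (p, graph.flatMap (fun cp => (cp.2.filter (fun q => q == p)).map (fun _ => cp.1))))) := by
  apply PySem.Dict.ext
  rw [pv_ofList_items,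
    PySem.Dict.items_eq_map_keys _
      (by
        rw [pv_dict_keys]
        simp [PySem.List.dedup_eq_ofList, PySem.Set.nodup_ofList]) [],
    pv_dict_keys]
  exact List.map_congr_left (fun k _ => by rw [pv_dict_getD])

-- A's fill loop and B's setdefault loop are the same step
lemma pv_setdefault_eq (d : PySem.Dict String (List String)) (n : String) :
    PySem.Dict.setdefault d n [] = if d.contains n then d else d.insert n [] := by
  by_cases h : d.contains n = true <;>
    simp [PySem.Dict.setdefault, PySem.Dict.insert, h]

-- ===== VERDICT (by name: the statement is the Claim_ definition above) =====
theorem get_adjacency_graph_spec : Claim_equal_get_adjacency_graph := by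
  intro graph _
  show _ = _
  unfold get_adjacency_graph get_adjacency_graph_alt
  rw [pv_state_split, pv_nodes_eq, pv_dict_flatten, pv_dict_eq]
  simp only [← pv_setdefault_eq]
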